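-- pv_equiv track=rewrite | github.com/soduco/paper-nestedner-icdar23-code | src/t1_dataset_tools/util_iob2.py | createJointLabels
-- ===== SOURCE A (Python) =====
-- def createJointLabels(ents):
--     uppern1,uppern2 = list(zip(*ents))
--     n1, n2 = [], []
--     for elem in uppern1:
--         elem = elem.replace('B-','b_')
--         elem = elem.replace('I-','i_')
--         n1.append(elem)
--     for elem in uppern2:
--         elem = elem.replace('B-','b_')
--         elem = elem.replace('I-','i_')
--         n2.append(elem)
--     former_n1 = ''
--     former_n2 = ''
--     n1_jl = []
--     n2_jl = []
--     jl = []
--     for e in n1: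
--         if e != former_n1 and e != "O":
--             l = e.replace('B-','b_')
--             n1_jl.append(l)
--             former_n1 = e
--         elif e == former_n1 and e != "O":
--             l = e.replace('I-','i_')
--             n1_jl.append(l)
--             former_n1 = e
--         else:
--             n1_jl.append(e)
--             former_n1 = e
--
--     for f in n2:
--         if f != former_n2 and f != "O":
--             l = f.replace('B-','b_')
--             n2_jl.append(l)
--             former_n2 = f
--         elif f == former_n2 and e != "O":
--             l = f.replace('I-','i_')
--             n2_jl.append(l)
--             former_n2 = f
--         else:
--             n2_jl.append(f)
--             former_n2 = f
--
--     for i in range(len(n1)):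
--         if n1_jl[i] != 'O':
--             jl.append('I-' + n1_jl[i] + '+' + n2_jl[i])
--         else:
--             jl.append(n1_jl[i] + '+' + n2_jl[i])
--     return jl
-- ===== SOURCE B (Python) =====
-- def createJointLabels(ents):
--     # zip(*ents) kept so the empty-input ValueError matches A; single pass replaces A's multi-list state machine
--     uppern1, uppern2 = list(zip(*ents))
--
--     def norm(s):
--         return s.replace('B-', 'b_').replace('I-', 'i_')
--
--     return [('I-' + a + '+' + b) if a != 'O' else (a + '+' + b)
--             for a, b in zip(map(norm, uppern1), map(norm, uppern2))]
-- ===== Notes on version B (the rewrite author's own statement) =====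
-- stated objective: simpler
-- what changed: Replaced A's five sequential list-building passes (two replace loops, two former_* state machines whose state never affects the appended value, and an index loop) by one zipWith-style pass that normalises each column entry once and formats the pair directly.
import Mathlib
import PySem

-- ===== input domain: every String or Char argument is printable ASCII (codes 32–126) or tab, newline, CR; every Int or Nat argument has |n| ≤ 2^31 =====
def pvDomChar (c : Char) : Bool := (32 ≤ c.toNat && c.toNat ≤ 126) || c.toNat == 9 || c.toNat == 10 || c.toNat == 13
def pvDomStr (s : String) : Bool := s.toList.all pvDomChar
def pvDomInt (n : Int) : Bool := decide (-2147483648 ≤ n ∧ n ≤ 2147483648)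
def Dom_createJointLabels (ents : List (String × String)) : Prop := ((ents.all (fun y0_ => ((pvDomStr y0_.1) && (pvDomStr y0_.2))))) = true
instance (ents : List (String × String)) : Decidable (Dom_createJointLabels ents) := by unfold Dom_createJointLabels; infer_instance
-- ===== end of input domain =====

-- B collapses A's five list-building passes into one zipWith-style pass (objective: simpler); return values agree on all nonempty inputs.

-- ===== PORT A =====
def createJointLabels (ents : List (String × String)) : List String :=
  let uppern1 : List String := ents.map Prod.fst   -- uppern1, uppern2 = list(zip(*ents))
  let uppern2 : List String := ents.map Prod.snd
  let n1 : List String := uppern1.foldl (fun acc elem =>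
      let elem := PySem.Str.replace elem "B-" "b_"
      let elem := PySem.Str.replace elem "I-" "i_"
      acc ++ [elem]) []
  let n2 : List String := uppern2.foldl (fun acc elem =>
      let elem := PySem.Str.replace elem "B-" "b_"
      let elem := PySem.Str.replace elem "I-" "i_"
      acc ++ [elem]) []
  let st1 : String × List String := n1.foldl (fun st e =>
      if e ≠ st.1 ∧ e ≠ "O" then (e, st.2 ++ [PySem.Str.replace e "B-" "b_"])
      else if e = st.1 ∧ e ≠ "O" then (e, st.2 ++ [PySem.Str.replace e "I-" "i_"])
      else (e, st.2 ++ [e])) ("", [])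
  let n1_jl : List String := st1.2
  -- Python's first loop variable `e` leaks into the second loop: there it equals n1's last element
  -- (on Pre_'s nonempty inputs n1 is nonempty, so the `getD ""` default is never used)
  let e : String := (n1.getLast?).getD ""
  let st2 : String × List String := n2.foldl (fun st f =>
      if f ≠ st.1 ∧ f ≠ "O" then (f, st.2 ++ [PySem.Str.replace f "B-" "b_"])
      else if f = st.1 ∧ e ≠ "O" then (f, st.2 ++ [PySem.Str.replace f "I-" "i_"])
      else (f, st.2 ++ [f])) ("", [])
  let n2_jl : List String := st2.2
  (PySem.List.pyRange 0 (n1.length : Int) 1).foldl (fun jl i =>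
      if PySem.List.pyGetD n1_jl i "" ≠ "O"
      then jl ++ ["I-" ++ PySem.List.pyGetD n1_jl i "" ++ "+" ++ PySem.List.pyGetD n2_jl i ""]
      else jl ++ [PySem.List.pyGetD n1_jl i "" ++ "+" ++ PySem.List.pyGetD n2_jl i ""]) []

-- ===== PORT B =====
def cjlNorm (s : String) : String :=
  PySem.Str.replace (PySem.Str.replace s "B-" "b_") "I-" "i_"

def createJointLabels_alt (ents : List (String × String)) : List String :=
  let uppern1 : List String := ents.map Prod.fst   -- uppern1, uppern2 = list(zip(*ents))
  let uppern2 : List String := ents.map Prod.snd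
  List.zipWith (fun a b => if a ≠ "O" then "I-" ++ a ++ "+" ++ b else a ++ "+" ++ b)
    (uppern1.map cjlNorm) (uppern2.map cjlNorm)

-- ===== PRECONDITION & SPEC =====
-- Python A raises ValueError on the empty list (the `uppern1, uppern2 = list(zip(*ents))` unpack); B raises there too.
def Pre_createJointLabels (ents : List (String × String)) : Prop := ents ≠ []
instance (ents : List (String × String)) : Decidable (Pre_createJointLabels ents) := by unfold Pre_createJointLabels; infer_instance
def pvWitness_createJointLabels : (List (String × String)) := [("B-PER", "O"), ("I-PER", "B-LOC")]
def Spec_createJointLabels (ents : List (String × String)) (out : List String) : Prop := out = createJointLabels_alt ents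
instance (ents : List (String × String)) (out : List String) : Decidable (Spec_createJointLabels ents out) := by unfold Spec_createJointLabels; infer_instance

-- ===== CLAIM (what is proved, stated in full; the proofs are below) =====
def Claim_equal_createJointLabels : Prop := ∀ (ents : List (String × String)), Dom_createJointLabels ents → Pre_createJointLabels ents → Spec_createJointLabels ents (createJointLabels ents)

-- ===== LEMMAS AND PROOFS =====

-- `noPair x y s` : no adjacent occurrence of the two-character pattern [x, y] inside s
def noPair (x y : Char) : List Char → Bool
  | a :: b :: t => !(a == x && b == y) && noPair x y (b :: t)
  | _ => true

theorem noPair_tail {x y a : Char} {t : List Char} (h : noPair x y (a :: t) = true) :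
    noPair x y t = true := by
  cases t with
  | nil => rfl
  | cons b t' => simp [noPair] at h; exact h.2

theorem noPair_cons_of_ne {x y a : Char} {t : List Char} (ha : a ≠ x) (h : noPair x y t = true) :
    noPair x y (a :: t) = true := by
  cases t with
  | nil => rfl
  | cons b t' => simp [noPair, ha, h]

theorem noPair_cons {x y a : Char} {t : List Char}
    (hhd : ∀ b, t.head? = some b → ¬(a = x ∧ b = y)) (h : noPair x y t = true) :
    noPair x y (a :: t) = true := by
  cases t with
  | nil => rfl
  | cons b t' =>
    have := hhd b rfl
    simp only [noPair, h, Bool.and_true, Bool.not_eq_true']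
    simp only [Bool.and_eq_false_iff, beq_eq_false_iff_ne]
    by_cases hax : a = x
    · exact Or.inr (fun hby => this ⟨hax, hby⟩)
    · exact Or.inl hax

theorem go_acc (old new : List Char) (fuel : Nat) (l acc : List Char) :
    PySem.Chars.replace.go old new fuel l acc = acc.reverse ++ PySem.Chars.replace.go old new fuel l [] := by
  induction fuel generalizing l acc with
  | zero => simp [PySem.Chars.replace.go]
  | succ n ih =>
    cases l with
    | nil => simp [PySem.Chars.replace.go]
    | cons c t =>
      simp only [PySem.Chars.replace.go]
      by_cases h : old.isPrefixOf (c :: t)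
      · simp [h]
        rw [ih _ (new.reverse ++ acc), ih _ new.reverse]
        simp
      · simp [h]
        rw [ih t (c :: acc), ih t [c]]
        simp

theorem go_fix (x y : Char) (new : List Char) (fuel : Nat) :
    ∀ l : List Char, noPair x y l = true →
      PySem.Chars.replace.go [x, y] new fuel l [] = l := by
  induction fuel with
  | zero => intro l _; simp [PySem.Chars.replace.go]
  | succ n ih =>
    intro l hl
    cases l with
    | nil => simp [PySem.Chars.replace.go]
    | cons c t =>
      have hpre : [x, y].isPrefixOf (c :: t) = false := by
        cases t with
        | nil => simp [List.isPrefixOf]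
        | cons b t' =>
          simp only [List.isPrefixOf, Bool.and_true]
          simp only [noPair] at hl
          have := (Bool.and_eq_true_iff.mp hl).1
          simp only [Bool.not_eq_true', Bool.and_eq_false_iff, beq_eq_false_iff_ne] at this
          rcases this with h | h <;> simp [beq_eq_false_iff_ne] <;> tauto
      simp only [PySem.Chars.replace.go, hpre, if_false, Bool.false_eq_true]
      rw [go_acc]
      simp [ih t (noPair_tail hl)]

theorem go_head (x y u v : Char) (fuel : Nat) (l : List Char) :
    (PySem.Chars.replace.go [x, y] [u, v] fuel l []).head? = some u ∨
    (PySem.Chars.replace.go [x, y] [u, v] fuel l []).head? = l.head? := by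
  cases fuel with
  | zero => right; simp [PySem.Chars.replace.go]
  | succ n =>
    cases l with
    | nil => right; simp [PySem.Chars.replace.go]
    | cons c t =>
      by_cases h : [x, y].isPrefixOf (c :: t)
      · left
        simp only [PySem.Chars.replace.go, h, if_true]
        rw [go_acc]
        simp
      · right
        simp only [PySem.Chars.replace.go, h, if_false, Bool.false_eq_true]
        rw [go_acc]
        simp

theorem go_noPair (x y u v p q : Char)
    (h1 : ¬(u = p ∧ v = q)) (h2 : v ≠ p) (h3 : u ≠ q) (fuel : Nat) :
    ∀ l : List Char, l.length ≤ fuel →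
      ((p = x ∧ q = y) ∨ noPair p q l = true) →
      noPair p q (PySem.Chars.replace.go [x, y] [u, v] fuel l []) = true := by
  induction fuel with
  | zero =>
    intro l hlen _
    have : l = [] := List.eq_nil_of_length_eq_zero (Nat.le_zero.mp hlen)
    subst this; simp [PySem.Chars.replace.go, noPair]
  | succ n ih =>
    intro l hlen hside
    cases l with
    | nil => simp [PySem.Chars.replace.go, noPair]
    | cons c t =>
      by_cases hpre : [x, y].isPrefixOf (c :: t) = true
      · -- match: c = x, t = y :: t'
        obtain ⟨hc, t', ht⟩ : x = c ∧ ∃ t', t = y :: t' := by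
          cases t with
          | nil => simp [List.isPrefixOf] at hpre
          | cons b t' =>
            simp only [List.isPrefixOf, Bool.and_eq_true_iff, beq_iff_eq] at hpre
            exact ⟨hpre.1, t', by rw [hpre.2.1]⟩
        subst ht; subst hc
        simp only [PySem.Chars.replace.go, hpre, if_true]
        rw [go_acc]
        have hlen' : t'.length ≤ n := by simp at hlen; omega
        have hside' : (p = x ∧ q = y) ∨ noPair p q t' = true := by
          rcases hside with h | h
          · exact Or.inl h
          · exact Or.inr (noPair_tail (noPair_tail h))
        have hrest := ih t' hlen' hside'
        simp only [List.reverse_cons, List.reverse_nil, List.nil_append, List.cons_append,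
          List.append_nil]
        -- goal: noPair p q (u :: v :: go … t' [])
        refine noPair_cons ?_ (noPair_cons_of_ne h2 hrest)
        intro b hb
        simp at hb
        intro hconj; exact h1 ⟨hconj.1, hb ▸ hconj.2⟩
      · -- no match
        simp only [PySem.Chars.replace.go, hpre, if_false, Bool.false_eq_true]
        rw [go_acc]
        simp only [List.reverse_cons, List.reverse_nil, List.nil_append, List.cons_append,
          List.nil_append]
        have hlen' : t.length ≤ n := by simp at hlen; omega
        have hside' : (p = x ∧ q = y) ∨ noPair p q t = true := by
          rcases hside with h | h
          · exact Or.inl h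
          · exact Or.inr (noPair_tail h)
        have hrest := ih t hlen' hside'
        apply noPair_cons _ hrest
        intro b hb
        rcases go_head x y u v n t with hh | hh
        · rw [hb] at hh
          have hbu : b = u := by injection hh.symm with h'; exact h'.symm
          intro hconj; exact h3 (hbu ▸ hconj.2)
        · rw [hb] at hh
          cases t with
          | nil => simp at hh
          | cons d t'' =>
            have hbd : b = d := by simp at hh; exact hh.symm ▸ rfl
            subst hbd
            intro hconj
            rcases hside with hs | hs
            · apply hpre
              simp [List.isPrefixOf, ← hs.1, ← hs.2, hconj.1, hconj.2]
            · simp [noPair] at hs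
              tauto

theorem replace_fix (x y : Char) (new s : List Char) (h : noPair x y s = true) :
    PySem.Chars.replace s [x, y] new = s := by
  simp only [PySem.Chars.replace, List.isEmpty]
  exact go_fix x y new s.length s h

theorem noPair_replace_self (x y u v : Char) (h1 : ¬(u = x ∧ v = y)) (h2 : v ≠ x) (h3 : u ≠ y)
    (s : List Char) : noPair x y (PySem.Chars.replace s [x, y] [u, v]) = true := by
  simp only [PySem.Chars.replace, List.isEmpty]
  exact go_noPair x y u v x y h1 h2 h3 s.length s le_rfl (Or.inl ⟨rfl, rfl⟩)

theorem noPair_replace_other (x y u v p q : Char) (h1 : ¬(u = p ∧ v = q)) (h2 : v ≠ p) (h3 : u ≠ q)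
    (s : List Char) (hs : noPair p q s = true) :
    noPair p q (PySem.Chars.replace s [x, y] [u, v]) = true := by
  simp only [PySem.Chars.replace, List.isEmpty]
  exact go_noPair x y u v p q h1 h2 h3 s.length s le_rfl (Or.inr hs)

theorem cjlNorm_noPair_B (s : String) : noPair 'B' '-' (cjlNorm s).toList = true := by
  simp only [cjlNorm, PySem.Str.toList_replace]
  refine noPair_replace_other 'I' '-' 'i' '_' 'B' '-' (by decide) (by decide) (by decide) _ ?_
  exact noPair_replace_self 'B' '-' 'b' '_' (by decide) (by decide) (by decide) _

theorem cjlNorm_noPair_I (s : String) : noPair 'I' '-' (cjlNorm s).toList = true := by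
  simp only [cjlNorm, PySem.Str.toList_replace]
  exact noPair_replace_self 'I' '-' 'i' '_' (by decide) (by decide) (by decide) _

theorem cjlNorm_fix_B (s : String) : PySem.Str.replace (cjlNorm s) "B-" "b_" = cjlNorm s := by
  apply String.toList_injective
  rw [PySem.Str.toList_replace]
  exact replace_fix 'B' '-' _ _ (cjlNorm_noPair_B s)

theorem cjlNorm_fix_I (s : String) : PySem.Str.replace (cjlNorm s) "I-" "i_" = cjlNorm s := by
  apply String.toList_injective
  rw [PySem.Str.toList_replace]
  exact replace_fix 'I' '-' _ _ (cjlNorm_noPair_I s)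

-- first state machine: every branch appends exactly the element itself
theorem sm1_fix (L : List String)
    (hfix : ∀ e ∈ L, PySem.Str.replace e "B-" "b_" = e ∧ PySem.Str.replace e "I-" "i_" = e) :
    ∀ (f0 : String) (acc : List String),
      (L.foldl (fun st e =>
        if e ≠ st.1 ∧ e ≠ "O" then (e, st.2 ++ [PySem.Str.replace e "B-" "b_"])
        else if e = st.1 ∧ e ≠ "O" then (e, st.2 ++ [PySem.Str.replace e "I-" "i_"])
        else (e, st.2 ++ [e])) (f0, acc)).2 = acc ++ L := by
  induction L with
  | nil => intro f0 acc; simp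
  | cons e L ih =>
    intro f0 acc
    have he := hfix e (List.mem_cons_self)
    have ih' := ih (fun x hx => hfix x (List.mem_cons_of_mem _ hx))
    simp only [List.foldl_cons]
    split_ifs with h₁ h₂
    · rw [he.1, ih']; simp
    · rw [he.2, ih']; simp
    · rw [ih']; simp

-- second state machine (its middle branch tests the leaked `e0`, but appends the same value)
theorem sm2_fix (e0 : String) (L : List String)
    (hfix : ∀ f ∈ L, PySem.Str.replace f "B-" "b_" = f ∧ PySem.Str.replace f "I-" "i_" = f) :
    ∀ (f0 : String) (acc : List String),
      (L.foldl (fun st f =>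
        if f ≠ st.1 ∧ f ≠ "O" then (f, st.2 ++ [PySem.Str.replace f "B-" "b_"])
        else if f = st.1 ∧ e0 ≠ "O" then (f, st.2 ++ [PySem.Str.replace f "I-" "i_"])
        else (f, st.2 ++ [f])) (f0, acc)).2 = acc ++ L := by
  induction L with
  | nil => intro f0 acc; simp
  | cons f L ih =>
    intro f0 acc
    have hf := hfix f (List.mem_cons_self)
    have ih' := ih (fun x hx => hfix x (List.mem_cons_of_mem _ hx))
    simp only [List.foldl_cons]
    split_ifs with h₁ h₂
    · rw [hf.1, ih']; simp
    · rw [hf.2, ih']; simp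
    · rw [ih']; simp

-- the index loop over two equal-length lists is zipWith
theorem range_fold_zipWith (A1 A2 : List String) (h : A1.length = A2.length) :
    (PySem.List.pyRange 0 (A1.length : Int) 1).foldl (fun jl i =>
        if PySem.List.pyGetD A1 i "" ≠ "O"
        then jl ++ ["I-" ++ PySem.List.pyGetD A1 i "" ++ "+" ++ PySem.List.pyGetD A2 i ""]
        else jl ++ [PySem.List.pyGetD A1 i "" ++ "+" ++ PySem.List.pyGetD A2 i ""]) [] =
      List.zipWith (fun a b => if a ≠ "O" then "I-" ++ a ++ "+" ++ b else a ++ "+" ++ b) A1 A2 := by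
  have hbody : (fun (jl : List String) (i : Int) =>
      if PySem.List.pyGetD A1 i "" ≠ "O"
      then jl ++ ["I-" ++ PySem.List.pyGetD A1 i "" ++ "+" ++ PySem.List.pyGetD A2 i ""]
      else jl ++ [PySem.List.pyGetD A1 i "" ++ "+" ++ PySem.List.pyGetD A2 i ""]) =
      (fun (jl : List String) (i : Int) => jl ++
        [if PySem.List.pyGetD A1 i "" ≠ "O"
         then "I-" ++ PySem.List.pyGetD A1 i "" ++ "+" ++ PySem.List.pyGetD A2 i ""
         else PySem.List.pyGetD A1 i "" ++ "+" ++ PySem.List.pyGetD A2 i ""]) := by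
    funext jl i; split_ifs <;> rfl
  rw [hbody, PySem.List.foldl_append_singleton_eq_map]
  · apply List.ext_getElem
    · simp [PySem.List.length_pyRange_one, h]
    · intro k hk1 hk2
      simp only [List.nil_append, List.getElem_map, PySem.List.getElem_pyRange_one, List.getElem_zipWith]
      have hkA1 : k < A1.length := by
        simp [PySem.List.length_pyRange_one] at hk1; omega
      have hkA2 : k < A2.length := h ▸ hkA1
      have g1 : PySem.List.pyGetD A1 ((0 : Int) + k) "" = A1[k] := by
        rw [zero_add, PySem.List.pyGetD_natCast]
        simp [List.getD_eq_getElem?_getD, List.getElem?_eq_getElem hkA1]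
      have g2 : PySem.List.pyGetD A2 ((0 : Int) + k) "" = A2[k] := by
        rw [zero_add, PySem.List.pyGetD_natCast]
        simp [List.getD_eq_getElem?_getD, List.getElem?_eq_getElem hkA2]
      rw [g1, g2]

-- ===== VERDICT (by name: the statement is the Claim_ definition above) =====
theorem createJointLabels_spec : Claim_equal_createJointLabels := by
  unfold Claim_equal_createJointLabels
  intro ents _ _
  unfold Spec_createJointLabels createJointLabels createJointLabels_alt
  simp only []
  rw [PySem.List.foldl_append_singleton_eq_map
    (f := fun elem => PySem.Str.replace (PySem.Str.replace elem "B-" "b_") "I-" "i_"),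
    PySem.List.foldl_append_singleton_eq_map
    (f := fun elem => PySem.Str.replace (PySem.Str.replace elem "B-" "b_") "I-" "i_")]
  have hmap1 : ((ents.map Prod.fst).map fun elem =>
      PySem.Str.replace (PySem.Str.replace elem "B-" "b_") "I-" "i_") = (ents.map Prod.fst).map cjlNorm := rfl
  have hmap2 : ((ents.map Prod.snd).map fun elem =>
      PySem.Str.replace (PySem.Str.replace elem "B-" "b_") "I-" "i_") = (ents.map Prod.snd).map cjlNorm := rfl
  simp only [List.nil_append, hmap1, hmap2]
  have hfix1 : ∀ e ∈ (ents.map Prod.fst).map cjlNorm,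
      PySem.Str.replace e "B-" "b_" = e ∧ PySem.Str.replace e "I-" "i_" = e := by
    intro e he
    obtain ⟨s, _, rfl⟩ := List.mem_map.mp he
    exact ⟨cjlNorm_fix_B s, cjlNorm_fix_I s⟩
  have hfix2 : ∀ e ∈ (ents.map Prod.snd).map cjlNorm,
      PySem.Str.replace e "B-" "b_" = e ∧ PySem.Str.replace e "I-" "i_" = e := by
    intro e he
    obtain ⟨s, _, rfl⟩ := List.mem_map.mp he
    exact ⟨cjlNorm_fix_B s, cjlNorm_fix_I s⟩
  rw [sm1_fix _ hfix1, sm2_fix _ _ hfix2]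
  simp only [List.nil_append]
  exact range_fold_zipWith _ _ (by simp)
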